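-- pv_equiv track=rewrite | github.com/PyThaiNLP/pythainlp | pythainlp/tokenize/core.py | indices_words
-- ===== SOURCE A (Python) =====
-- def indices_words(words: list[str]) -> list[tuple[int, int]]:
--     """Convert a list of words to a list of character index pairs.
--
--     This function takes a list of words and returns the start and end
--     character indices for each word in the original text.
--
--     :param list words: list of words
--     :return: list of tuples (start_index, end_index) for each word
--     :rtype: list[tuple[int, int]]
--
--     :Example:
--
--         >>> from pythainlp.tokenize.core import indices_words
--         >>> indices_words(["สวัสดี", "ครับ"])
--         [(0, 5), (6, 9)]
--         >>> indices_words(["hello", "world"])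
--         [(0, 4), (5, 9)]
--     """
--     indices = []
--     start_index = 0
--     for word in words:
--         end_index = start_index + len(word) - 1
--         indices.append((start_index, end_index))
--         start_index += len(word)
--
--     return indices
-- ===== SOURCE B (Python) =====
-- def indices_words(words):
--     # Closed-form per index, no threaded state: the characters of word i end
--     # at (sum of the lengths of words[0..i]) - 1 and start len(words[i])
--     # earlier; each sum is recomputed independently from the list (O(n^2),
--     # a direct definitional formulation rather than a running accumulator).
--     result = []
--     for i in range(len(words)):
--         through = sum(map(len, words[: i + 1]))
--         result.append((through - len(words[i]), through - 1))
--     return result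
-- ===== Notes on version B (the rewrite author's own statement) =====
-- stated objective: alternative
-- what changed: Replaces A's single pass threading a mutable start_index by a stateless per-index closed form: for each i the cumulative end offset is recomputed as an independent sum over words[:i+1] and the start derived from it, trading O(n) for O(n^2) with no accumulator.
import Mathlib
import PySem

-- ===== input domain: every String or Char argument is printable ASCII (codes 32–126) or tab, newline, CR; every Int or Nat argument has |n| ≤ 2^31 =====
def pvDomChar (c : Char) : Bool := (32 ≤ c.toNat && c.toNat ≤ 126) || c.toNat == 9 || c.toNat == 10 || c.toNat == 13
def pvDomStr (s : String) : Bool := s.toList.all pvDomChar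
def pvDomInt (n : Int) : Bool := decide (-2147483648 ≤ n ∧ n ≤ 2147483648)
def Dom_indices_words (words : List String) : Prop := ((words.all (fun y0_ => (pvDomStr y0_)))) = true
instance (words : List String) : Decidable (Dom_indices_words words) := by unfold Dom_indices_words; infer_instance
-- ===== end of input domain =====

-- B replaces A's threaded start_index loop by a per-index closed form (each end offset recomputed as an independent sum over the prefix); stateless decomposition, honestly O(n^2), not faster.

-- ===== PORT A =====
-- A: fold threading (indices, start_index); append (start, start+len-1), advance start.
def indices_words (words : List String) : List (Int × Int) :=
  (words.foldl
    (fun (st : List (Int × Int) × Int) word =>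
      (st.1 ++ [(st.2, st.2 + PySem.Str.len word - 1)], st.2 + PySem.Str.len word))
    ([], 0)).1

-- ===== PORT B =====
-- B loop body: through = sum(map(len, words[:i+1])); pair (through - len(words[i]), through - 1).
-- words[i] is a Nat index always in range (i < len(words)); ported as getD i "".
def pvEntry (words : List String) (i : Nat) : Int × Int :=
  let through := ((words.take (i + 1)).map PySem.Str.len).sum
  (through - PySem.Str.len (words.getD i ""), through - 1)

def indices_words_alt (words : List String) : List (Int × Int) :=
  (List.range words.length).foldl (fun result i => result ++ [pvEntry words i]) []

-- ===== PRECONDITION & SPEC =====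
def Spec_indices_words (words : List String) (out : List (Int × Int)) : Prop := out = indices_words_alt words
instance (words : List String) (out : List (Int × Int)) : Decidable (Spec_indices_words words out) := by unfold Spec_indices_words; infer_instance

-- ===== CLAIM =====
def Claim_equal_indices_words : Prop := ∀ (words : List String), Dom_indices_words words → Spec_indices_words words (indices_words words)

-- ===== LEMMAS AND PROOFS =====
-- canonical recursion with explicit offset, matching A's threaded state
def pvCore (words : List String) (s : Int) : List (Int × Int) :=
  match words with
  | [] => []
  | w :: ws => (s, s + PySem.Str.len w - 1) :: pvCore ws (s + PySem.Str.len w)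

theorem pvA_core (words : List String) (acc : List (Int × Int)) (s : Int) :
    (words.foldl
      (fun (st : List (Int × Int) × Int) word =>
        (st.1 ++ [(st.2, st.2 + PySem.Str.len word - 1)], st.2 + PySem.Str.len word))
      (acc, s)).1 = acc ++ pvCore words s := by
  induction words generalizing acc s with
  | nil => simp [pvCore]
  | cons w ws ih => rw [List.foldl_cons, ih]; simp [pvCore]

-- pvCore is translation-equivariant
theorem pvCore_shift (words : List String) (s d : Int) :
    pvCore words (s + d) = (pvCore words s).map (fun p => (p.1 + d, p.2 + d)) := by
  induction words generalizing s with
  | nil => simp [pvCore]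
  | cons w ws ih =>
    simp only [pvCore, List.map_cons, List.cons.injEq]
    refine ⟨by simp [Prod.ext_iff]; ring, ?_⟩
    rw [show s + d + PySem.Str.len w = (s + PySem.Str.len w) + d by ring, ih]

-- the fold with append is the map over the index range
theorem pvFold_map (g : Nat → Int × Int) (l : List Nat) (acc : List (Int × Int)) :
    l.foldl (fun result i => result ++ [g i]) acc = acc ++ l.map g := by
  induction l generalizing acc with
  | nil => simp
  | cons x xs ih => simp [ih]

-- the entry for index i+1 in (w :: ws) is ws's entry for i shifted by len w
theorem pvEntry_succ (w : String) (ws : List String) (i : Nat) :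
    pvEntry (w :: ws) (i + 1)
      = (fun p => (p.1 + PySem.Str.len w, p.2 + PySem.Str.len w)) (pvEntry ws i) := by
  simp only [pvEntry, List.take_succ_cons, List.map_cons, List.sum_cons, List.getD_cons_succ]
  simp only [Prod.mk.injEq]
  constructor <;> ring

theorem pvB_core (words : List String) :
    (List.range words.length).map (pvEntry words) = pvCore words 0 := by
  induction words with
  | nil => rfl
  | cons w ws ih =>
    rw [List.length_cons, List.range_succ_eq_map, List.map_cons, List.map_map]
    have hhead : pvEntry (w :: ws) 0 = ((0 : Int), PySem.Str.len w - 1) := by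
      simp [pvEntry]
    have htail : (pvEntry (w :: ws)) ∘ Nat.succ = (fun p => (p.1 + PySem.Str.len w, p.2 + PySem.Str.len w)) ∘ (pvEntry ws) := by
      funext i
      exact pvEntry_succ w ws i
    rw [hhead, htail, ← List.map_map, ih, pvCore]
    have := pvCore_shift ws 0 (PySem.Str.len w)
    simp only [zero_add] at this
    rw [← this]
    simp [add_comm]

-- ===== VERDICT =====
theorem indices_words_spec : Claim_equal_indices_words := by
  intro words _
  unfold Spec_indices_words indices_words indices_words_alt
  rw [pvA_core, pvFold_map, pvB_core]
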